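-- pv_equiv track=rewrite | github.com/Sadeeptha-B/Advanced-Algorithms | Week 2/boyer_moore.py | matched_prefix
-- ===== SOURCE A (Python) =====
-- def matched_prefix(z_array, pat):
--     m = len(pat)
--     mp_array = [m]*(m+1)
--     ind = None
--
--     for i in range(m):
--         if i == z_array[i]-1:
--             ind = m - z_array[i]
--             mp_array[ind] = i
--         elif ind is not None:
--             ind -= 1
--             mp_array[ind] = mp_array[ind+1]
--
--     return mp_array
-- ===== SOURCE B (Python) =====
-- def matched_prefix(z_array, pat):
--     # Single pass building the array back-to-front, then reverse: no ind/None state machine.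
--     m = len(pat)
--     mp = [m]
--     for i in range(m):
--         mp.append(i if z_array[i] == i + 1 else mp[-1])
--     mp.reverse()
--     return mp
-- ===== Notes on version B (the rewrite author's own statement) =====
-- stated objective: simpler
-- what changed: Replaced A's stateful forward ind/None pointer state machine with a single forward pass that appends each cell's value (building the array back-to-front) followed by one reverse.
import Mathlib
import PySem

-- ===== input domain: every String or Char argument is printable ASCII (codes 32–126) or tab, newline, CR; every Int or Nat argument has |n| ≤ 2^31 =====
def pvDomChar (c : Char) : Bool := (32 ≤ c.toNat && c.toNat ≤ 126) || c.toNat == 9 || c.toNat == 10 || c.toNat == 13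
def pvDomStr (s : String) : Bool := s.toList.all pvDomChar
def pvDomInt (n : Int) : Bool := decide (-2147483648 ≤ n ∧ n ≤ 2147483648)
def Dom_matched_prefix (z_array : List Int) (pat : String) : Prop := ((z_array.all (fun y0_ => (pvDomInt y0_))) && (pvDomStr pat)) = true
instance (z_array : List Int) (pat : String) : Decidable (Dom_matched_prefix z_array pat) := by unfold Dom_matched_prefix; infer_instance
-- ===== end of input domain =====

-- B replaces A's stateful forward `ind`/None pointer by one forward pass that appends
-- each cell's value back-to-front and a final reverse (objective: simpler).

-- ===== PORT A =====
-- One iteration of A's for-loop; state = (mp_array, ind).  The writes mp_array[ind] = …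
-- and the read mp_array[ind+1] are ported with pySetD/pyGetD: on every state the loop
-- reaches, 0 ≤ ind ≤ m, so these indices are in range and the defaults are never used
-- (z_array[i] may be out of range: Pre_ excludes exactly that IndexError).
def matchedPrefixStepA (z_array : List Int) (m : Int)
    (st : List Int × Option Int) (i : Int) : List Int × Option Int :=
  let z := PySem.List.pyGetD z_array i 0
  if i = z - 1 then
    let ind := m - z
    (PySem.List.pySetD st.1 ind i, some ind)
  else
    match st.2 with
    | some ind0 =>
        let ind := ind0 - 1
        (PySem.List.pySetD st.1 ind (PySem.List.pyGetD st.1 (ind + 1) 0), some ind)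
    | none => st

def matched_prefix (z_array : List Int) (pat : String) : List Int :=
  let m : Int := PySem.Str.len pat
  let mp_array : List Int := List.replicate (m.toNat + 1) m
  ((PySem.List.pyRange 0 m).foldl (matchedPrefixStepA z_array m) (mp_array, none)).1

-- ===== PORT B =====
def matchedPrefixStepB (z_array : List Int) (mp : List Int) (i : Int) : List Int :=
  mp ++ [if PySem.List.pyGetD z_array i 0 = i + 1 then i else PySem.List.pyGetD mp (-1) 0]

def matched_prefix_alt (z_array : List Int) (pat : String) : List Int :=
  let m : Int := PySem.Str.len pat
  (((PySem.List.pyRange 0 m).foldl (matchedPrefixStepB z_array) [m])).reverse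

-- ===== PRECONDITION & SPEC =====
-- A reads z_array[i] for every i < len(pat): Pre_ excludes exactly the inputs where
-- that raises IndexError (z_array shorter than pat).
def Pre_matched_prefix (z_array : List Int) (pat : String) : Prop :=
  PySem.Str.len pat ≤ (z_array.length : Int)
instance (z_array : List Int) (pat : String) : Decidable (Pre_matched_prefix z_array pat) := by
  unfold Pre_matched_prefix; infer_instance

def pvWitness_matched_prefix : List Int × String := ([1, 0, 3], "abc")

def Spec_matched_prefix (z_array : List Int) (pat : String) (out : List Int) : Prop := out = matched_prefix_alt z_array pat
instance (z_array : List Int) (pat : String) (out : List Int) : Decidable (Spec_matched_prefix z_array pat out) := by unfold Spec_matched_prefix; infer_instance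

-- ===== CLAIM (what is proved, stated in full; the proofs are below) =====
def Claim_equal_matched_prefix : Prop := ∀ (z_array : List Int) (pat : String), Dom_matched_prefix z_array pat → Pre_matched_prefix z_array pat → Spec_matched_prefix z_array pat (matched_prefix z_array pat)

-- ===== LEMMAS AND PROOFS =====

-- A's loop state after k iterations (k ≤ m), as a function of Nat k.
def foldA (z : List Int) (m : Nat) (k : Nat) : List Int × Option Int :=
  ((List.range k).map (fun (j : Nat) => (j : Int))).foldl
    (matchedPrefixStepA z (m : Int)) (List.replicate (m + 1) (m : Int), none)

-- B's accumulator after k iterations.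
def foldB (z : List Int) (k : Nat) (m : Nat) : List Int :=
  ((List.range k).map (fun (j : Nat) => (j : Int))).foldl (matchedPrefixStepB z) [(m : Int)]

lemma foldA_succ (z : List Int) (m k : Nat) :
    foldA z m (k + 1) = matchedPrefixStepA z (m : Int) (foldA z m k) (k : Int) := by
  simp [foldA, List.range_succ]

lemma foldB_succ (z : List Int) (m k : Nat) :
    foldB z (k + 1) m = matchedPrefixStepB z (foldB z k m) (k : Int) := by
  simp [foldB, List.range_succ]

lemma foldB_length (z : List Int) (k m : Nat) : (foldB z k m).length = k + 1 := by
  induction k with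
  | zero => simp [foldB]
  | succ k ih => rw [foldB_succ]; simp [matchedPrefixStepB, ih]

lemma foldB_ne_nil (z : List Int) (k m : Nat) : foldB z k m ≠ [] := by
  intro h
  have := foldB_length z k m
  simp [h] at this

-- setting the last cell of the replicate prefix
lemma set_replicate_append (t : Nat) (c v : Int) (r : List Int) (ht : 0 < t) :
    (List.replicate t c ++ r).set (t - 1) v = List.replicate (t - 1) c ++ v :: r := by
  obtain ⟨s, rfl⟩ : ∃ s, t = s + 1 := ⟨t - 1, by omega⟩
  have : List.replicate (s + 1) c = List.replicate s c ++ [c] := by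
    simp [List.replicate_succ' (n := s)]
  rw [this]
  simp

-- reading the head of r
lemma getD_replicate_append (t : Nat) (c : Int) (x : Int) (r : List Int) :
    PySem.List.pyGetD (List.replicate t c ++ x :: r) (t : Int) 0 = x := by
  rw [PySem.List.pyGetD_eq_getElem _ _ (by positivity) (by simp only [List.length_append, List.length_replicate, List.length_cons]; push_cast; omega)]
  simp

-- The central invariant: after k ≤ m iterations, A's mp_array is the still-default
-- prefix followed by B's accumulator reversed, and A's ind is none (with B all-default)
-- or exactly m - k.
lemma invariant (z : List Int) (m : Nat) :
    ∀ k, k ≤ m →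
      (foldA z m k).1 = List.replicate (m - k) (m : Int) ++ (foldB z k m).reverse
      ∧ ((foldA z m k).2 = none ∧ foldB z k m = List.replicate (k + 1) (m : Int)
         ∨ (foldA z m k).2 = some ((m : Int) - k)) := by
  intro k
  induction k with
  | zero =>
      intro _
      constructor
      · show List.replicate (m + 1) (m : Int) = List.replicate (m - 0) (m : Int) ++ [(m : Int)].reverse
        simpa using (List.replicate_succ' : List.replicate (m + 1) ((m : Int)) = _)
      · left; exact ⟨rfl, rfl⟩
  | succ k ih =>
      intro hk1
      have hk : k ≤ m := by omega
      obtain ⟨hmp, hind⟩ := ih hk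
      rw [foldA_succ, foldB_succ]
      unfold matchedPrefixStepA matchedPrefixStepB
      have hget : PySem.List.pyGetD z (k : Int) 0 = z.getD k 0 := by
        simp
      by_cases hc : (k : Int) = PySem.List.pyGetD z (k : Int) 0 - 1
      · -- match branch: z[k] = k+1
        have hz1 : PySem.List.pyGetD z (k : Int) 0 = (k : Int) + 1 := by omega
        rw [if_pos hc, if_pos (by omega)]
        simp only [hz1]
        constructor
        · rw [hmp, PySem.List.pySetD_of_nonneg _ _ (by push_cast; omega)]
          have htn : ((m : Int) - ((k : Int) + 1)).toNat = (m - k) - 1 := by omega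
          rw [htn, set_replicate_append (m - k) _ _ _ (by omega)]
          have : m - (k + 1) = (m - k) - 1 := by omega
          simp [this]
        · right
          simp only [Option.some.injEq]
          push_cast
          ring
      · rw [if_neg hc, if_neg (by omega)]
        rcases hind with ⟨hnone, hall⟩ | hsome
        · -- ind still None: A leaves mp unchanged; B appends the default m
          constructor
          · simp only [hnone]
            rw [hmp, hall, PySem.List.pyGetD_neg_one _ _ (by simp)]
            simp only [List.getLast_replicate, List.reverse_append, List.reverse_cons,
              List.reverse_nil, List.nil_append, List.reverse_replicate, List.singleton_append]
            rw [show ((m : Int) :: List.replicate (k + 1) (m : Int))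
                  = List.replicate (k + 2) (m : Int) from List.replicate_succ.symm]
            rw [← List.replicate_add, ← List.replicate_add]
            congr 1
            omega
          · left
            refine ⟨by simp [hnone], ?_⟩
            rw [hall, PySem.List.pyGetD_neg_one _ _ (by simp)]
            simp only [List.getLast_replicate]
            rw [show k + 1 + 1 = (k + 1) + 1 from rfl, List.replicate_succ' (n := k + 1)]
        · -- ind = m - k: A copies mp[m-k] into mp[m-k-1]; B appends its last element
          rw [hsome]
          have hne := foldB_ne_nil z k m
          obtain ⟨v, r, hrev⟩ : ∃ v r, (foldB z k m).reverse = v :: r := by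
            rcases h : (foldB z k m).reverse with _ | ⟨v, r⟩
            · exact absurd (by simpa using congrArg List.reverse h) hne
            · exact ⟨v, r, rfl⟩
          have hlastv : PySem.List.pyGetD (foldB z k m) (-1) 0 = v := by
            rw [PySem.List.pyGetD_neg_one _ _ hne, List.getLast_eq_head_reverse]
            simp [hrev]
          have hk1m : k < m := by omega
          refine ⟨?_, ?_⟩
          · dsimp only
            rw [hmp, hlastv]
            have harith : ((m : Int) - (k : Int) - 1).toNat = (m - k) - 1 := by omega
            rw [PySem.List.pySetD_of_nonneg _ _ (by omega), harith]
            have hidx : (m : Int) - (k : Int) - 1 + 1 = ((m - k : Nat) : Int) := by omega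
            rw [hrev, hidx, getD_replicate_append]
            rw [set_replicate_append (m - k) _ _ _ (by omega)]
            have h1 : m - (k + 1) = (m - k) - 1 := by omega
            simp [h1, hrev]
          · dsimp only
            right
            congr 1
            push_cast
            ring

-- ===== VERDICT (by name: the statement is the Claim_ definition above) =====
theorem matched_prefix_spec : Claim_equal_matched_prefix := by
  intro z pat _ hpre
  unfold Spec_matched_prefix matched_prefix matched_prefix_alt
  unfold Pre_matched_prefix at hpre
  rw [PySem.Str.len_eq] at hpre ⊢
  dsimp only
  rw [PySem.List.pyRange_zero_natCast, Int.toNat_natCast]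
  have h := (invariant z pat.toList.length pat.toList.length le_rfl).1
  simp only [foldA, foldB] at h
  simpa using h
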